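-- pv_equiv track=rewrite | github.com/razimantv/leetcode-solutions | Solutions/C/coupon-code-validator/Solution.py | validateCoupons
-- ===== SOURCE A (Python) =====
-- def validateCoupons(
--     codes: list[str], lines: list[str], actives: list[bool]
-- ) -> list[str]:
--     return [c for l, c in sorted([
--         (line, code)
--         for code, line, active in zip(codes, lines, actives) if (
--             active and code and
--             line in [
--                 "electronics", "grocery", "pharmacy", "restaurant"
--             ] and
--             ('a' + code).isidentifier()
--         )
--     ])]
-- ===== SOURCE B (Python) =====
-- def validateCoupons(codes, lines, actives):
--     categories = ["electronics", "grocery", "pharmacy", "restaurant"]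
--     buckets = {c: [] for c in categories}
--     for code, line, active in zip(codes, lines, actives):
--         if active and code and line in categories and ('a' + code).isidentifier():
--             buckets[line].append(code)
--     result = []
--     for c in categories:
--         result.extend(sorted(buckets[c]))
--     return result
-- ===== Notes on version B (the rewrite author's own statement) =====
-- stated objective: alternative
-- what changed: Replaces A's single global sort of (line, code) tuples by a dict bucketing valid codes per category in one pass, then concatenates the four per-bucket sorted code lists in the categories' fixed alphabetical order.
import Mathlib
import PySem

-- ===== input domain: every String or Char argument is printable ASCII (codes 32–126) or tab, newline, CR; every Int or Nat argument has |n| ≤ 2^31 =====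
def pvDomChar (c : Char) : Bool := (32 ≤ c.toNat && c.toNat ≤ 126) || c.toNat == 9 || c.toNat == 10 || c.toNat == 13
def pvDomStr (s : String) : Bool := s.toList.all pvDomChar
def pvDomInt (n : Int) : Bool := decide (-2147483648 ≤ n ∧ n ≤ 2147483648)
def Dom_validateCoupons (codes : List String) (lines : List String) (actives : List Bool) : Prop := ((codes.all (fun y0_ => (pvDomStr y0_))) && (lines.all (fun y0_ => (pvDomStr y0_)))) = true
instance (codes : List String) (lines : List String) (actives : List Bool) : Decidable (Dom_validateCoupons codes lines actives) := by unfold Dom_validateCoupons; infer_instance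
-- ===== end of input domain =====

-- B replaces A's single global sort of (line, code) tuples by a per-category bucket dict
-- (built in one pass) followed by four per-bucket sorts concatenated in the categories'
-- alphabetical order (objective: alternative decomposition, same asymptotic cost).


-- ===== PORT A =====
-- ('a' + code).isidentifier(): the prefixed 'a' is a valid identifier start, so on the
-- printable-ASCII domain this holds iff every char of code is ASCII alphanumeric or '_'
-- (exact on Dom_: the only non-printable chars admitted, tab/LF/CR, fail isalnum too).
def pvIdentAfterA (code : String) : Bool := code.toList.all (fun c => PySem.Chars.isalnum c || c == '_')

def validateCoupons (codes : List String) (lines : List String) (actives : List Bool) : List String :=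
  (PySem.List.sorted2
    (((codes.zip (lines.zip actives)).filter (fun t =>
        t.2.2 && !(t.1 == "") &&
        (["electronics", "grocery", "pharmacy", "restaurant"].contains t.2.1) &&
        pvIdentAfterA t.1)).map (fun t => (t.2.1, t.1)))
    Prod.fst Prod.snd false).map (fun p => p.2)

-- ===== PORT B =====
def pvCategories : List String := ["electronics", "grocery", "pharmacy", "restaurant"]

-- the bucket dict: {c: [] for c in categories}, then one pass appending each valid code
def pvBuckets (codes : List String) (lines : List String) (actives : List Bool) :
    PySem.Dict String (List String) :=
  (codes.zip (lines.zip actives)).foldl (fun d t =>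
      if t.2.2 && !(t.1 == "") && (pvCategories.contains t.2.1) && pvIdentAfterA t.1
      then d.modify t.2.1 [] (fun v => v ++ [t.1]) else d)
    (pvCategories.foldl (fun d c => d.insert c ([] : List String)) PySem.Dict.empty)

def validateCoupons_alt (codes : List String) (lines : List String) (actives : List Bool) : List String :=
  pvCategories.foldl (fun acc c =>
    acc ++ PySem.List.sorted ((pvBuckets codes lines actives).getD c []) (fun x => x)) []

-- ===== PRECONDITION & SPEC =====
def Spec_validateCoupons (codes : List String) (lines : List String) (actives : List Bool) (out : List String) : Prop := out = validateCoupons_alt codes lines actives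
instance (codes : List String) (lines : List String) (actives : List Bool) (out : List String) : Decidable (Spec_validateCoupons codes lines actives out) := by unfold Spec_validateCoupons; infer_instance

-- ===== CLAIM (what is proved, stated in full; the proofs are below) =====
def Claim_equal_validateCoupons : Prop := ∀ (codes : List String) (lines : List String) (actives : List Bool), Dom_validateCoupons codes lines actives → Spec_validateCoupons codes lines actives (validateCoupons codes lines actives)

-- ===== LEMMAS AND PROOFS =====

-- Python's lexicographic order on (line, code) pairs of strings.
def pvLexLe (a b : String × String) : Prop := a.1 < b.1 ∨ (a.1 = b.1 ∧ a.2 ≤ b.2)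

-- the Bool "strictly before" test that PySem.List.sorted2 Prod.fst Prod.snd uses
def pvBefore (a b : String × String) : Bool :=
  decide (a.1 < b.1) || (!decide (b.1 < a.1) && decide (a.2 < b.2))

lemma pvLexLe_trans {a b c : String × String} (h1 : pvLexLe a b) (h2 : pvLexLe b c) :
    pvLexLe a c := by
  rcases h1 with h1 | ⟨e1, l1⟩ <;> rcases h2 with h2 | ⟨e2, l2⟩
  · exact Or.inl (lt_trans h1 h2)
  · exact Or.inl (e2 ▸ h1)
  · exact Or.inl (e1 ▸ h2)
  · exact Or.inr ⟨e1.trans e2, le_trans l1 l2⟩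

lemma pvLexLe_antisymm {a b : String × String} (h1 : pvLexLe a b) (h2 : pvLexLe b a) :
    a = b := by
  rcases h1 with h1 | ⟨e1, l1⟩ <;> rcases h2 with h2 | ⟨e2, l2⟩
  · exact absurd h2 (lt_asymm h1)
  · exact absurd h1 (e2 ▸ lt_irrefl _)
  · exact absurd h2 (e1 ▸ lt_irrefl _)
  · exact Prod.ext e1 (le_antisymm l1 l2)

lemma pvBefore_true {a b : String × String} (h : pvBefore a b = true) : pvLexLe a b := by
  unfold pvBefore at h
  simp only [Bool.or_eq_true, Bool.and_eq_true, Bool.not_eq_true', decide_eq_true_eq,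
    decide_eq_false_iff_not] at h
  rcases h with h | ⟨h1, h2⟩
  · exact Or.inl h
  · rcases lt_trichotomy a.1 b.1 with hl | he | hg
    · exact Or.inl hl
    · exact Or.inr ⟨he, le_of_lt h2⟩
    · exact absurd hg h1

lemma pvBefore_false {a b : String × String} (h : pvBefore a b = false) : pvLexLe b a := by
  unfold pvBefore at h
  simp only [Bool.or_eq_false_iff, Bool.and_eq_false_iff, Bool.not_eq_false',
    decide_eq_false_iff_not, decide_eq_true_eq] at h
  rcases h with ⟨h1, h2 | h3⟩
  · exact Or.inl h2
  · rcases lt_trichotomy a.1 b.1 with hl | he | hg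
    · exact absurd hl h1
    · exact Or.inr ⟨he.symm, le_of_not_gt (by simpa using h3)⟩
    · exact Or.inl hg

lemma pvInsertBy_nil (x : String × String) :
    PySem.List.insertBy pvBefore x [] = [x] := rfl

lemma pvInsertBy_cons (x y : String × String) (ys : List (String × String)) :
    PySem.List.insertBy pvBefore x (y :: ys) =
      if pvBefore x y then x :: y :: ys else y :: PySem.List.insertBy pvBefore x ys := rfl

lemma pvInsertBy_pairwise (x : String × String) (l : List (String × String))
    (h : l.Pairwise pvLexLe) : (PySem.List.insertBy pvBefore x l).Pairwise pvLexLe := by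
  induction l with
  | nil => simp [pvInsertBy_nil]
  | cons y ys ih =>
    rw [pvInsertBy_cons]
    rcases List.pairwise_cons.mp h with ⟨hy, hys⟩
    by_cases hb : pvBefore x y = true
    · simp only [hb, if_true]
      refine List.pairwise_cons.mpr ⟨?_, h⟩
      intro z hz
      rcases List.mem_cons.mp hz with rfl | hz
      · exact pvBefore_true hb
      · exact pvLexLe_trans (pvBefore_true hb) (hy z hz)
    · rw [Bool.not_eq_true] at hb
      simp only [hb, Bool.false_eq_true, if_false]
      refine List.pairwise_cons.mpr ⟨?_, ih hys⟩
      intro z hz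
      rcases (PySem.List.mem_insertBy _ _ _ _).mp hz with rfl | hz
      · exact pvBefore_false hb
      · exact hy z hz

lemma pvFoldl_insertBy_pairwise (xs : List (String × String)) (acc : List (String × String))
    (h : acc.Pairwise pvLexLe) :
    (xs.foldl (fun acc x => PySem.List.insertBy pvBefore x acc) acc).Pairwise pvLexLe := by
  induction xs generalizing acc with
  | nil => exact h
  | cons x xs ih => exact ih _ (pvInsertBy_pairwise x acc h)

lemma pvSorted2_eq_foldl (xs : List (String × String)) :
    PySem.List.sorted2 xs Prod.fst Prod.snd false =
      xs.foldl (fun acc x => PySem.List.insertBy pvBefore x acc) [] := rfl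

lemma pvSorted2_pairwise (xs : List (String × String)) :
    (PySem.List.sorted2 xs Prod.fst Prod.snd false).Pairwise pvLexLe := by
  rw [pvSorted2_eq_foldl]
  exact pvFoldl_insertBy_pairwise xs [] (List.Pairwise.nil)

-- any pvLexLe-sorted rearrangement of xs IS sorted2 xs fst snd
lemma pvSorted2_eq_of_perm_of_pairwise (xs ys : List (String × String))
    (hp : ys.Perm xs) (hs : ys.Pairwise pvLexLe) :
    PySem.List.sorted2 xs Prod.fst Prod.snd false = ys := by
  exact List.Perm.eq_of_pairwise (fun a b _ _ h1 h2 => pvLexLe_antisymm h1 h2)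
    (pvSorted2_pairwise xs) hs
    ((PySem.List.sorted2_perm xs Prod.fst Prod.snd false).trans hp.symm)

lemma pvFlatMap_perm_congr {α β : Type} (cs : List α) (f g : α → List β)
    (h : ∀ c ∈ cs, (f c).Perm (g c)) : (cs.flatMap f).Perm (cs.flatMap g) := by
  induction cs with
  | nil => simp
  | cons c cs ih =>
    simp only [List.flatMap_cons]
    exact (h c (List.mem_cons_self)).append (ih (fun c hc => h c (List.mem_cons_of_mem _ hc)))

-- splitting a list whose keys all lie in a duplicate-free list cs into its per-key blocks
lemma pvFlatMap_filter_perm (cs : List String) (P : List (String × String))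
    (hnd : cs.Nodup) (hmem : ∀ p ∈ P, p.1 ∈ cs) :
    (cs.flatMap (fun c => P.filter (fun p => p.1 == c))).Perm P := by
  induction cs generalizing P with
  | nil =>
    have : P = [] := List.eq_nil_iff_forall_not_mem.mpr (fun p hp => by simpa using hmem p hp)
    simp [this]
  | cons c cs ih =>
    rw [List.flatMap_cons]
    have hcc : c ∉ cs := (List.nodup_cons.mp hnd).1
    have htail : cs.flatMap (fun c' => P.filter (fun p => p.1 == c')) =
        cs.flatMap (fun c' => (P.filter (fun p => !(p.1 == c))).filter (fun p => p.1 == c')) := by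
      refine List.flatMap_congr (fun c' hc' => ?_)
      rw [List.filter_filter]
      refine List.filter_congr (fun p _ => ?_)
      by_cases hpc : p.1 = c'
      · have hne : c' ≠ c := fun h => hcc (h ▸ hc')
        simp [hpc, hne]
      · simp [hpc]
    rw [htail]
    have hperm := ih (P.filter (fun p => !(p.1 == c))) (List.nodup_cons.mp hnd).2
      (fun p hp => by
        have h1 := hmem p (List.mem_of_mem_filter hp)
        have h2 := List.of_mem_filter hp
        simp only [Bool.not_eq_true', beq_eq_false_iff_ne, ne_eq] at h2
        rcases List.mem_cons.mp h1 with h | h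
        · exact absurd h h2
        · exact h)
    exact (List.Perm.append_left _ hperm).trans (List.filter_append_perm _ P)

-- each per-key block consists of pairs whose first component is the key
lemma pvFilter_fst_eq (P : List (String × String)) (c : String) :
    ((P.filter (fun p => p.1 == c)).map (fun p => p.2)).map (fun s => (c, s)) =
      P.filter (fun p => p.1 == c) := by
  rw [List.map_map]
  have h : ∀ p ∈ P.filter (fun p => p.1 == c), ((fun s => (c, s)) ∘ fun p => p.2) p = p := by
    intro p hp
    have := List.of_mem_filter hp
    simp only [beq_iff_eq] at this
    exact Prod.ext this.symm rfl
  exact (List.map_congr_left h).trans (List.map_id' _)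

-- MAIN: the global tuple sort, projected to codes, equals the per-category sorts
-- concatenated in the (strictly increasing) key order cs.
lemma pvMain (cs : List String) (P : List (String × String))
    (hlt : cs.Pairwise (· < ·)) (hmem : ∀ p ∈ P, p.1 ∈ cs) :
    (PySem.List.sorted2 P Prod.fst Prod.snd false).map (fun p => p.2) =
      cs.flatMap (fun c =>
        PySem.List.sorted ((P.filter (fun p => p.1 == c)).map (fun p => p.2)) (fun x => x)) := by
  have hys : PySem.List.sorted2 P Prod.fst Prod.snd false =
      cs.flatMap (fun c =>
        (PySem.List.sorted ((P.filter (fun p => p.1 == c)).map (fun p => p.2)) (fun x => x)).map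
          (fun s => (c, s))) := by
    refine pvSorted2_eq_of_perm_of_pairwise _ _ ?_ ?_
    · -- permutation with P
      refine List.Perm.trans (pvFlatMap_perm_congr cs _ (fun c => P.filter (fun p => p.1 == c))
        (fun c _ => ?_)) (pvFlatMap_filter_perm cs P hlt.nodup hmem)
      calc ((PySem.List.sorted ((P.filter (fun p => p.1 == c)).map (fun p => p.2)) (fun x => x)).map
              (fun s => (c, s))).Perm
            (((P.filter (fun p => p.1 == c)).map (fun p => p.2)).map (fun s => (c, s))) :=
              (PySem.List.sorted_perm _ _ _).map _
        _ = P.filter (fun p => p.1 == c) := pvFilter_fst_eq P c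
    · -- sortedness
      rw [List.flatMap_def, List.pairwise_flatten]
      constructor
      · intro l hl
        rcases List.mem_map.mp hl with ⟨c, _, rfl⟩
        refine List.Pairwise.map _ ?_ (PySem.List.sorted_pairwise
          ((P.filter (fun p => p.1 == c)).map (fun p => p.2)) (fun x => x))
        intro a b hab
        exact Or.inr ⟨rfl, hab⟩
      · rw [List.pairwise_map]
        refine hlt.imp_of_mem (fun {c c'} _ _ hcc => ?_)
        intro x hx y hy
        rcases List.mem_map.mp hx with ⟨a, _, rfl⟩
        rcases List.mem_map.mp hy with ⟨b, _, rfl⟩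
        exact Or.inl hcc
  rw [hys, List.map_flatMap]
  refine List.flatMap_congr (fun c _ => ?_)
  rw [List.map_map]
  simp

lemma pvBuckets0_getD (c : String) :
    (pvCategories.foldl (fun d c => d.insert c ([] : List String)) PySem.Dict.empty).getD c []
      = [] := by
  simp only [pvCategories, List.foldl]
  simp [PySem.Dict.getD_insert]


lemma pvCategories_pairwise_lt : pvCategories.Pairwise (· < ·) := by
  have h : pvCategories.Pairwise (fun a b => a.toList < b.toList) := by
    unfold pvCategories; decide
  exact h.imp (fun hab => String.lt_iff_toList_lt.mpr hab)

lemma pvBuckets_getD (codes : List String) (lines : List String) (actives : List Bool)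
    (c : String) :
    (pvBuckets codes lines actives).getD c [] =
      ((((codes.zip (lines.zip actives)).filter (fun t =>
          t.2.2 && !(t.1 == "") && (pvCategories.contains t.2.1) && pvIdentAfterA t.1)).map
          (fun t => (t.2.1, t.1))).filter (fun p => p.1 == c)).map (fun p => p.2) := by
  unfold pvBuckets
  rw [PySem.List.foldl_if_eq_foldl_filter
    (fun t : String × String × Bool => t.2.2 && !(t.1 == "") && (pvCategories.contains t.2.1) && pvIdentAfterA t.1)
    (fun (d : PySem.Dict String (List String)) t => d.modify t.2.1 [] (fun v => v ++ [t.1]))]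
  rw [show ((codes.zip (lines.zip actives)).filter (fun t =>
        t.2.2 && !(t.1 == "") && (pvCategories.contains t.2.1) && pvIdentAfterA t.1)).foldl
        (fun d t => d.modify t.2.1 [] (fun v => v ++ [t.1]))
        (pvCategories.foldl (fun d c => d.insert c ([] : List String)) PySem.Dict.empty) =
      (((codes.zip (lines.zip actives)).filter (fun t =>
        t.2.2 && !(t.1 == "") && (pvCategories.contains t.2.1) && pvIdentAfterA t.1)).map
        (fun t => (t.2.1, t.1))).foldl (fun d p => d.modify p.1 [] (fun v => v ++ [p.2]))
        (pvCategories.foldl (fun d c => d.insert c ([] : List String)) PySem.Dict.empty)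
    from (List.foldl_map (f := fun t : String × String × Bool => (t.2.1, t.1))
      (g := fun (d : PySem.Dict String (List String)) p => d.modify p.1 [] (fun v => v ++ [p.2]))).symm]
  rw [PySem.Dict.getD_foldl_modify_append, pvBuckets0_getD, List.nil_append]

-- ===== VERDICT (by name: the statement is the Claim_ definition above) =====
theorem validateCoupons_spec : Claim_equal_validateCoupons := by
  intro codes lines actives _
  unfold Spec_validateCoupons validateCoupons validateCoupons_alt
  rw [PySem.List.foldl_append_eq_flatMap
    (fun c => PySem.List.sorted ((pvBuckets codes lines actives).getD c []) (fun x => x))]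
  rw [List.nil_append]
  rw [List.flatMap_congr (fun c _ => by rw [pvBuckets_getD codes lines actives c])]
  have hmain := pvMain pvCategories
    (((codes.zip (lines.zip actives)).filter (fun t =>
        t.2.2 && !(t.1 == "") && (pvCategories.contains t.2.1) && pvIdentAfterA t.1)).map
        (fun t => (t.2.1, t.1)))
    pvCategories_pairwise_lt
    (by
      intro p hp
      rcases List.mem_map.mp hp with ⟨t, ht, rfl⟩
      have h := List.of_mem_filter ht
      simp only [Bool.and_eq_true] at h
      simpa [List.contains_iff_mem] using h.1.2)
  rw [show (["electronics", "grocery", "pharmacy", "restaurant"] : List String) = pvCategories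
    from rfl]
  exact hmain
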